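-- pv_equiv track=rewrite | github.com/JRicardo22/Algortimos-de-Agrupamiento | Programas/programa3.py | contar_abcd
-- ===== SOURCE A (Python) =====
-- def contar_abcd(vec_i, vec_j):
--     a=b=c=d=0
--     for xi, xj in zip(vec_i, vec_j):
--         if xi is None or xj is None:
--             continue
--         if xi==1 and xj==1:
--             a += 1
--         elif xi==1 and xj==0:
--             b += 1
--         elif xi==0 and xj==1:
--             c += 1
--         elif xi==0 and xj==0:
--             d += 1
--     return a,b,c,d
-- ===== SOURCE B (Python) =====
-- def contar_abcd(vec_i, vec_j):
--     # Marginal-totals algorithm: keep the valid 0/1 pairs, then a = inner product,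
--     # and derive the other three cells from the marginals (b=r1-a, c=c1-a, d=n-r1-c1+a).
--     valid = [(xi, xj) for xi, xj in zip(vec_i, vec_j)
--              if xi in (0, 1) and xj in (0, 1)]
--     n = len(valid)
--     r1 = sum(xi for xi, _ in valid)
--     c1 = sum(xj for _, xj in valid)
--     a = sum(xi * xj for xi, xj in valid)
--     return a, r1 - a, c1 - a, n - r1 - c1 + a
-- ===== Notes on version B (the rewrite author's own statement) =====
-- stated objective: alternative
-- what changed: Replaces the four-way branch-per-element counting loop by a marginal-totals computation: filter the valid 0/1 pairs, compute n, the row marginal r1, the column marginal c1 and the inner product a, then derive b=r1-a, c=c1-a, d=n-r1-c1+a algebraically.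
import Mathlib
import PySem

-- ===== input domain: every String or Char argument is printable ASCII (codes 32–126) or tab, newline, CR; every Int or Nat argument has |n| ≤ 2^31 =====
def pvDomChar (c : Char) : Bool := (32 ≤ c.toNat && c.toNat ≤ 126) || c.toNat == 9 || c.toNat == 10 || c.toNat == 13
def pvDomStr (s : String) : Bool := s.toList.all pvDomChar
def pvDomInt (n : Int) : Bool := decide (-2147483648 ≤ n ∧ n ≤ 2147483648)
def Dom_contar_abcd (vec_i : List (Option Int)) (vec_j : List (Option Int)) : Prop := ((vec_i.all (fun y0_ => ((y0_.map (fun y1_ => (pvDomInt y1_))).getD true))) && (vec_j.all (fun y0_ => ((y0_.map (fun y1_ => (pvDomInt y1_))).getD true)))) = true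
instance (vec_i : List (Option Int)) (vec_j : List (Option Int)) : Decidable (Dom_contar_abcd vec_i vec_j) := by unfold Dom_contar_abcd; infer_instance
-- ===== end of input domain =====

-- ===== PORT A =====
-- B replaces A's four-way branch-per-element counting by a marginal-totals computation
-- (inner product + row/column sums, with b, c, d derived algebraically); exact equivalence.
def contar_abcd (vec_i : List (Option Int)) (vec_j : List (Option Int)) : Int × Int × Int × Int :=
  (vec_i.zip vec_j).foldl
    (fun st p =>
      match p with
      | (none, _) => st
      | (_, none) => st
      | (some xi, some xj) =>
        if xi = 1 ∧ xj = 1 then (st.1 + 1, st.2.1, st.2.2.1, st.2.2.2)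
        else if xi = 1 ∧ xj = 0 then (st.1, st.2.1 + 1, st.2.2.1, st.2.2.2)
        else if xi = 0 ∧ xj = 1 then (st.1, st.2.1, st.2.2.1 + 1, st.2.2.2)
        else if xi = 0 ∧ xj = 0 then (st.1, st.2.1, st.2.2.1, st.2.2.2 + 1)
        else st)
    (0, 0, 0, 0)

-- ===== PORT B =====
def contar_abcd_alt (vec_i : List (Option Int)) (vec_j : List (Option Int)) : Int × Int × Int × Int :=
  let valid : List (Int × Int) :=
    (vec_i.zip vec_j).filterMap
      (fun p => match p with
        | (some xi, some xj) =>
          if (xi = 0 ∨ xi = 1) ∧ (xj = 0 ∨ xj = 1) then some (xi, xj) else none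
        | _ => none)
  let n : Int := valid.length
  let r1 : Int := (valid.map Prod.fst).sum
  let c1 : Int := (valid.map Prod.snd).sum
  let a : Int := (valid.map (fun p => p.1 * p.2)).sum
  (a, r1 - a, c1 - a, n - r1 - c1 + a)

-- ===== PRECONDITION & SPEC =====
def Spec_contar_abcd (vec_i : List (Option Int)) (vec_j : List (Option Int)) (out : Int × Int × Int × Int) : Prop := out = contar_abcd_alt vec_i vec_j
instance (vec_i : List (Option Int)) (vec_j : List (Option Int)) (out : Int × Int × Int × Int) : Decidable (Spec_contar_abcd vec_i vec_j out) := by unfold Spec_contar_abcd; infer_instance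

-- ===== CLAIM (what is proved, stated in full; the proofs are below) =====
def Claim_equal_contar_abcd : Prop := ∀ (vec_i : List (Option Int)) (vec_j : List (Option Int)), Dom_contar_abcd vec_i vec_j → Spec_contar_abcd vec_i vec_j (contar_abcd vec_i vec_j)

-- ===== LEMMAS AND PROOFS =====
-- A's fold from an arbitrary state, expressed through the filtered valid-pair list.
theorem foldl_counts (l : List (Option Int × Option Int)) (st : Int × Int × Int × Int) :
    l.foldl
      (fun st p =>
        match p with
        | (none, _) => st
        | (_, none) => st
        | (some xi, some xj) =>
          if xi = 1 ∧ xj = 1 then (st.1 + 1, st.2.1, st.2.2.1, st.2.2.2)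
          else if xi = 1 ∧ xj = 0 then (st.1, st.2.1 + 1, st.2.2.1, st.2.2.2)
          else if xi = 0 ∧ xj = 1 then (st.1, st.2.1, st.2.2.1 + 1, st.2.2.2)
          else if xi = 0 ∧ xj = 0 then (st.1, st.2.1, st.2.2.1, st.2.2.2 + 1)
          else st)
      st
    = (let fl := l.filterMap (fun p => match p with
        | (some xi, some xj) =>
          if (xi = 0 ∨ xi = 1) ∧ (xj = 0 ∨ xj = 1) then some ((xi : Int), (xj : Int)) else none
        | _ => none)
       (st.1 + (fl.map (fun p => p.1 * p.2)).sum,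
        st.2.1 + ((fl.map Prod.fst).sum - (fl.map (fun p => p.1 * p.2)).sum),
        st.2.2.1 + ((fl.map Prod.snd).sum - (fl.map (fun p => p.1 * p.2)).sum),
        st.2.2.2 + ((fl.length : Int) - (fl.map Prod.fst).sum - (fl.map Prod.snd).sum
                    + (fl.map (fun p => p.1 * p.2)).sum))) := by
  induction l generalizing st with
  | nil => simp
  | cons hd tl ih =>
    obtain ⟨o1, o2⟩ := hd
    match o1, o2 with
    | none, _ => simpa using ih st
    | some xi, none => simpa using ih st
    | some xi, some xj =>
      simp only [List.foldl_cons, List.filterMap_cons]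
      rw [ih]
      by_cases h11 : xi = 1 ∧ xj = 1
      · obtain ⟨rfl, rfl⟩ := h11; simp; omega
      · by_cases h10 : xi = 1 ∧ xj = 0
        · obtain ⟨rfl, rfl⟩ := h10; simp; omega
        · by_cases h01 : xi = 0 ∧ xj = 1
          · obtain ⟨rfl, rfl⟩ := h01; simp; omega
          · by_cases h00 : xi = 0 ∧ xj = 0
            · obtain ⟨rfl, rfl⟩ := h00; simp; omega
            · have hval : ¬ ((xi = 0 ∨ xi = 1) ∧ (xj = 0 ∨ xj = 1)) := by
                rintro ⟨hx, hy⟩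
                rcases hx with rfl | rfl <;> rcases hy with rfl | rfl
                · exact h00 ⟨rfl, rfl⟩
                · exact h01 ⟨rfl, rfl⟩
                · exact h10 ⟨rfl, rfl⟩
                · exact h11 ⟨rfl, rfl⟩
              simp [h11, h10, h01, h00, hval]

-- ===== VERDICT (by name: the statement is the Claim_ definition above) =====
theorem contar_abcd_spec : Claim_equal_contar_abcd := by
  intro vec_i vec_j _
  unfold Spec_contar_abcd contar_abcd contar_abcd_alt
  rw [foldl_counts]
  simp
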